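-- pv_equiv track=rewrite | github.com/patriciagam/FP | Projeto 01/projeto_1.py | corta_texto
-- ===== SOURCE A (Python) =====
-- def corta_texto(cad, coluna_l):
--     """Devolve duas cadeias de carateres, a primeira com um comprimento até à largura
--     fornecida e a segunda contendo o resto do texto.
--
--     Args:
--         cad (str): cadeia de carateres limpa
--         coluna_l (int): largura da coluna
--
--     Returns:
--         tuple: tuplo constituído por duas cadeias de carateres
--     """
--     palavras = cad.split()
--     str1 = str2 = ""
--     for p in range(len(palavras)):
--         if p == 0:
--             str1 = palavras[p]
--         elif len(str1) + 1 + len(palavras[p]) > coluna_l: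
--             str2 = " ".join(palavras[p:])
--             return (str1, str2)
--         else:
--             str1 += " " + palavras[p]
--     return (str1, str2)
-- ===== SOURCE B (Python) =====
-- def corta_texto(cad, coluna_l):
--     """Prefix-width table + binary search instead of greedy growth: cum[k] is the
--     width of the first k+1 words joined (plus one trailing unit), strictly increasing,
--     so the cut index is found by bisection rather than by measuring str1 each step."""
--     palavras = cad.split()
--     if not palavras:
--         return ("", "")
--     cum = []
--     t = 0
--     for w in palavras:
--         t += len(w) + 1
--         cum.append(t)          # cum[k] = width of first k+1 words + 1
--     alvo = coluna_l + 1
--     lo, hi = 0, len(cum)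
--     while lo < hi:             # first index with cum[idx] > alvo
--         mid = (lo + hi) // 2
--         if cum[mid] <= alvo:
--             lo = mid + 1
--         else:
--             hi = mid
--     i = lo if lo >= 1 else 1   # the first word is kept even if it exceeds the width
--     return (" ".join(palavras[:i]), " ".join(palavras[i:]))
-- ===== Notes on version B (the rewrite author's own statement) =====
-- stated objective: alternative
-- what changed: Replaces A's greedy loop that re-measures the growing joined string at every word with a prefix-width table (cumulative widths, strictly increasing) whose cut index is located by a hand-written binary search, then one take/drop split.
import Mathlib
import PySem

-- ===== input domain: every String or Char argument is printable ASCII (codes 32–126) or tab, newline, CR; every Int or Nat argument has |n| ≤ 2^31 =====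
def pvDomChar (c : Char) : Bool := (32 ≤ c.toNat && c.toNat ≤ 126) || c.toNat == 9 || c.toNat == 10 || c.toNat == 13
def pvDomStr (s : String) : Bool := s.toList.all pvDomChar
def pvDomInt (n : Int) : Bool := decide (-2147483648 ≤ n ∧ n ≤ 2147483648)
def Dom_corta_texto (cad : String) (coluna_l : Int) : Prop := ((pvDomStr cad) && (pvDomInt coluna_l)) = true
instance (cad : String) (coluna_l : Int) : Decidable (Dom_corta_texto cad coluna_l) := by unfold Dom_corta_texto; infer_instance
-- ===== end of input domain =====

-- B replaces A's greedy grow-and-measure loop by a prefix-width table located by binary search (alternative decomposition, same exact result).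

-- ===== PORT A =====
-- 'for p in range(len(palavras))' with early return, as index recursion over p
def cortaLoopA (palavras : List String) (coluna_l : Int) (str1 str2 : String) (p : Nat) : String × String :=
  if h : p < palavras.length then
    if p = 0 then
      cortaLoopA palavras coluna_l (palavras[p]) str2 (p + 1)
    else if PySem.Str.len str1 + 1 + PySem.Str.len (palavras[p]) > coluna_l then
      (str1, PySem.Str.join " " (PySem.List.slice palavras (some (p : Int)) none))
    else
      cortaLoopA palavras coluna_l (str1 ++ " " ++ palavras[p]) str2 (p + 1)
  else (str1, str2)
termination_by palavras.length - p

def corta_texto (cad : String) (coluna_l : Int) : String × String :=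
  cortaLoopA (PySem.Str.split₀ cad) coluna_l "" "" 0

-- ===== PORT B =====
-- 'for w in palavras: t += len(w)+1; cum.append(t)'
def buildCum : List String → Int → List Int
  | [], _ => []
  | w :: ws, t => (t + PySem.Str.len w + 1) :: buildCum ws (t + PySem.Str.len w + 1)

-- 'while lo < hi: mid=(lo+hi)//2; ...' — first index with cum[idx] > alvo
def bsearchB (cum : List Int) (alvo : Int) (lo hi : Nat) : Nat :=
  if _h : lo < hi then
    let mid := (lo + hi) / 2
    if cum.getD mid 0 ≤ alvo then bsearchB cum alvo (mid + 1) hi else bsearchB cum alvo lo mid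
  else lo
termination_by hi - lo

def corta_texto_alt (cad : String) (coluna_l : Int) : String × String :=
  let palavras := PySem.Str.split₀ cad
  if palavras = [] then ("", "")
  else
    let cum := buildCum palavras 0
    let lo := bsearchB cum (coluna_l + 1) 0 cum.length
    let i := if lo ≥ 1 then lo else 1
    (PySem.Str.join " " (palavras.take i), PySem.Str.join " " (palavras.drop i))

-- ===== PRECONDITION & SPEC =====
def Spec_corta_texto (cad : String) (coluna_l : Int) (out : String × String) : Prop := out = corta_texto_alt cad coluna_l
instance (cad : String) (coluna_l : Int) (out : String × String) : Decidable (Spec_corta_texto cad coluna_l out) := by unfold Spec_corta_texto; infer_instance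

-- ===== CLAIM (what is proved, stated in full; the proofs are below) =====
def Claim_equal_corta_texto : Prop := ∀ (cad : String) (coluna_l : Int), Dom_corta_texto cad coluna_l → Spec_corta_texto cad coluna_l (corta_texto cad coluna_l)

-- ===== LEMMAS AND PROOFS =====

-- width bookkeeping: sumW ws = sum of (len w + 1); the cut condition compares prefix sums
def sumW (ws : List String) : Int := (ws.map (fun w => PySem.Str.len w + 1)).sum

theorem sumW_nil : sumW [] = 0 := rfl

theorem sumW_cons (w : String) (ws : List String) : sumW (w :: ws) = PySem.Str.len w + 1 + sumW ws := by
  simp [sumW]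

theorem sumW_append (xs ys : List String) : sumW (xs ++ ys) = sumW xs + sumW ys := by
  simp [sumW]

theorem sumW_nonneg (ws : List String) : 0 ≤ sumW ws := by
  induction ws with
  | nil => simp [sumW]
  | cons w ws ih =>
    have hw : 0 ≤ PySem.Str.len w := by simp [PySem.Str.len_eq]
    rw [sumW_cons]; omega

theorem sumW_take_le (ws : List String) {j k : Nat} (h : j ≤ k) :
    sumW (ws.take j) ≤ sumW (ws.take k) := by
  have h1 : (ws.take k).take j = ws.take j := by rw [List.take_take]; congr 1; omega
  calc sumW (ws.take j) = sumW ((ws.take k).take j) := by rw [h1]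
    _ ≤ sumW ((ws.take k).take j) + sumW ((ws.take k).drop j) := by
        have := sumW_nonneg ((ws.take k).drop j); omega
    _ = sumW (ws.take k) := by rw [← sumW_append, List.take_append_drop]

theorem length_buildCum (ws : List String) (t : Int) : (buildCum ws t).length = ws.length := by
  induction ws generalizing t with
  | nil => rfl
  | cons w ws ih => simp [buildCum, ih]

theorem buildCum_getD (ws : List String) (t : Int) (j : Nat) (hj : j < ws.length) :
    (buildCum ws t).getD j 0 = t + sumW (ws.take (j + 1)) := by
  induction ws generalizing t j with
  | nil => simp at hj
  | cons w ws ih =>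
    cases j with
    | zero =>
      simp only [buildCum, List.getD_cons_zero, List.take_succ_cons, List.take_zero,
        sumW_cons, sumW_nil]
      ring
    | succ j =>
      simp only [buildCum, List.getD_cons_succ]
      rw [ih _ j (by simpa using hj)]
      simp only [List.take_succ_cons, sumW_cons]
      ring

-- binary-search invariant: the returned index r keeps cum[r-1] ≤ alvo and alvo < cum[r]
theorem bsearchB_inv (cum : List Int) (alvo : Int) :
    ∀ n lo hi, hi - lo = n → lo ≤ hi → hi ≤ cum.length →
    (0 < lo → cum.getD (lo - 1) 0 ≤ alvo) → (hi < cum.length → alvo < cum.getD hi 0) →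
    lo ≤ bsearchB cum alvo lo hi ∧ bsearchB cum alvo lo hi ≤ hi ∧
    (0 < bsearchB cum alvo lo hi → cum.getD (bsearchB cum alvo lo hi - 1) 0 ≤ alvo) ∧
    (bsearchB cum alvo lo hi < cum.length → alvo < cum.getD (bsearchB cum alvo lo hi) 0) := by
  intro n
  induction n using Nat.strong_induction_on with
  | _ n ih =>
    intro lo hi hn hlh hhi h1 h2
    by_cases hlt : lo < hi
    · rw [bsearchB, dif_pos hlt]
      set mid := (lo + hi) / 2 with hmid
      have hmlo : lo ≤ mid := by omega
      have hmhi : mid < hi := by omega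
      by_cases hc : cum.getD mid 0 ≤ alvo
      · rw [if_pos hc]
        have hr := ih (hi - (mid + 1)) (by omega) (mid + 1) hi rfl (by omega) hhi
          (fun _ => by simpa using hc) h2
        exact ⟨by have := hr.1; omega, hr.2.1, hr.2.2.1, hr.2.2.2⟩
      · rw [if_neg hc]
        have hr := ih (mid - lo) (by omega) lo mid rfl (by omega) (by omega) h1
          (fun _ => not_le.mp hc)
        exact ⟨hr.1, by have := hr.2.1; omega, hr.2.2.1, hr.2.2.2⟩
    · rw [bsearchB, dif_neg hlt]
      have : lo = hi := by omega
      subst this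
      exact ⟨le_refl _, le_refl _, h1, h2⟩

-- join-by-space helpers on the String level
theorem str_join_nil : PySem.Str.join " " ([] : List String) = "" := by
  apply String.ext
  simp [PySem.Str.toList_join, PySem.Chars.join_nil]

theorem str_join_singleton (w : String) : PySem.Str.join " " [w] = w := by
  apply String.ext
  simp [PySem.Str.toList_join, PySem.Chars.join_singleton]

theorem chars_join_append_singleton (sep x : List Char) :
    ∀ (xs : List (List Char)) (a : List Char),
    PySem.Chars.join sep ((a :: xs) ++ [x]) = PySem.Chars.join sep (a :: xs) ++ sep ++ x := by
  intro xs
  induction xs with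
  | nil =>
    intro a
    simp only [List.nil_append, List.cons_append]
    rw [PySem.Chars.join_cons_cons, PySem.Chars.join_singleton, PySem.Chars.join_singleton]
  | cons b xs ih =>
    intro a
    simp only [List.cons_append]
    rw [PySem.Chars.join_cons_cons, PySem.Chars.join_cons_cons]
    have hb := ih b
    simp only [List.cons_append] at hb
    rw [hb]
    simp [List.append_assoc]

theorem str_join_append_singleton (x : String) (xs : List String) (h : xs ≠ []) :
    PySem.Str.join " " (xs ++ [x]) = PySem.Str.join " " xs ++ " " ++ x := by
  obtain ⟨a, xs', rfl⟩ : ∃ a xs', xs = a :: xs' := by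
    cases xs with
    | nil => exact absurd rfl h
    | cons a xs' => exact ⟨a, xs', rfl⟩
  apply String.ext
  simp only [PySem.Str.toList_join, List.map_append, List.map_cons, List.map_nil,
    String.toList_append]
  exact chars_join_append_singleton " ".toList x.toList (List.map String.toList xs') a.toList

theorem take_succ_concat (ws : List String) (p : Nat) (hp : p < ws.length) :
    ws.take (p + 1) = ws.take p ++ [ws[p]] := by
  rw [← List.take_concat_get hp, List.concat_eq_append]

theorem join_take_succ (ws : List String) (p : Nat) (hp1 : 1 ≤ p) (hp : p < ws.length) :
    PySem.Str.join " " (ws.take (p + 1)) = PySem.Str.join " " (ws.take p) ++ " " ++ ws[p] := by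
  rw [take_succ_concat ws p hp, str_join_append_singleton]
  intro h
  have := congrArg List.length h
  simp [Nat.min_eq_left (le_of_lt hp)] at this
  omega

theorem str_len_space : PySem.Str.len " " = 1 := by decide

theorem len_join_take (ws : List String) :
    ∀ p, 1 ≤ p → p ≤ ws.length →
    PySem.Str.len (PySem.Str.join " " (ws.take p)) = sumW (ws.take p) - 1 := by
  intro p
  induction p with
  | zero => omega
  | succ p ih =>
    intro _ hle
    by_cases hp1 : 1 ≤ p
    · have hp : p < ws.length := by omega
      rw [join_take_succ ws p hp1 hp, PySem.Str.len_append, PySem.Str.len_append, str_len_space,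
        ih hp1 (le_of_lt hp), take_succ_concat ws p hp, sumW_append, sumW_cons, sumW_nil]
      ring
    · have hp0 : p = 0 := by omega
      subst hp0
      cases ws with
      | nil => simp at hle
      | cons w rest =>
        simp only [List.take_succ_cons, List.take_zero]
        rw [str_join_singleton, sumW_cons, sumW_nil]
        ring

-- A's loop, started at p ≥ 1 with str1 = the first p words joined, cuts at max p r
theorem loopA_eq (ws : List String) (coluna_l : Int) (r : Nat) (hr : r ≤ ws.length)
    (hle : ∀ j, j < ws.length → j < r → sumW (ws.take (j + 1)) ≤ coluna_l + 1)
    (hgt : ∀ j, r ≤ j → j < ws.length → coluna_l + 1 < sumW (ws.take (j + 1))) :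
    ∀ n p, ws.length - p = n → 1 ≤ p → p ≤ ws.length →
    cortaLoopA ws coluna_l (PySem.Str.join " " (ws.take p)) "" p
      = (PySem.Str.join " " (ws.take (max p r)), PySem.Str.join " " (ws.drop (max p r))) := by
  intro n
  induction n using Nat.strong_induction_on with
  | _ n ih =>
    intro p hn hp1 hple
    by_cases hp : p < ws.length
    · rw [cortaLoopA, dif_pos hp, if_neg (by omega : ¬ p = 0)]
      have hcond : (PySem.Str.len (PySem.Str.join " " (ws.take p)) + 1 + PySem.Str.len ws[p] > coluna_l)
          ↔ (coluna_l + 1 < sumW (ws.take (p + 1))) := by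
        rw [len_join_take ws p hp1 (le_of_lt hp), take_succ_concat ws p hp, sumW_append,
          sumW_cons, sumW_nil]
        omega
      by_cases hc : coluna_l + 1 < sumW (ws.take (p + 1))
      · rw [if_pos (hcond.mpr hc)]
        have hpr : r ≤ p := by
          by_contra hcon
          exact absurd hc (not_lt.mpr (hle p hp (by omega)))
        have hmax : max p r = p := by omega
        rw [hmax, PySem.List.slice_from_natCast]
      · rw [if_neg (fun hcc => hc (hcond.mp hcc))]
        have hpr : p < r := by
          by_contra hcon
          exact hc (hgt p (by omega) hp)
        rw [← join_take_succ ws p hp1 hp]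
        rw [ih (ws.length - (p + 1)) (by omega) (p + 1) rfl (by omega) (by omega)]
        have hmax : max (p + 1) r = max p r := by omega
        rw [hmax]
    · have hpe : p = ws.length := by omega
      rw [cortaLoopA, dif_neg hp]
      have hmax : max p r = p := by omega
      rw [hmax, hpe]
      simp [str_join_nil]

theorem corta_texto_main (cad : String) (coluna_l : Int) :
    corta_texto cad coluna_l = corta_texto_alt cad coluna_l := by
  unfold corta_texto corta_texto_alt
  set ws := PySem.Str.split₀ cad with hws
  cases hw : ws with
  | nil => rw [cortaLoopA]; simp
  | cons w rest =>
    rw [if_neg (by simp)]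
    set cum := buildCum (w :: rest) 0 with hcum
    have hlen : cum.length = (w :: rest).length := length_buildCum _ _
    have hget : ∀ j, j < (w :: rest).length → cum.getD j 0 = sumW ((w :: rest).take (j + 1)) := by
      intro j hj
      rw [hcum, buildCum_getD _ _ _ hj]; ring
    set r := bsearchB cum (coluna_l + 1) 0 cum.length with hrdef
    have hinv := bsearchB_inv cum (coluna_l + 1) cum.length 0 cum.length rfl (by omega) (le_refl _)
      (by omega) (by omega)
    rw [← hrdef] at hinv
    obtain ⟨-, hrle, hpred, hsucc⟩ := hinv
    have hrle' : r ≤ (w :: rest).length := by omega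
    -- monotone characterization from the two boundary facts
    have hle : ∀ j, j < (w :: rest).length → j < r → sumW ((w :: rest).take (j + 1)) ≤ coluna_l + 1 := by
      intro j hj hjr
      have h1 : cum.getD (r - 1) 0 ≤ coluna_l + 1 := hpred (by omega)
      rw [hget (r - 1) (by omega)] at h1
      calc sumW ((w :: rest).take (j + 1)) ≤ sumW ((w :: rest).take (r - 1 + 1)) :=
            sumW_take_le _ (by omega)
        _ ≤ coluna_l + 1 := h1
    have hgt : ∀ j, r ≤ j → j < (w :: rest).length → coluna_l + 1 < sumW ((w :: rest).take (j + 1)) := by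
      intro j hjr hj
      have h1 : coluna_l + 1 < cum.getD r 0 := hsucc (by omega)
      rw [hget r (by omega)] at h1
      calc coluna_l + 1 < sumW ((w :: rest).take (r + 1)) := h1
        _ ≤ sumW ((w :: rest).take (j + 1)) := sumW_take_le _ (by omega)
    -- A side: unfold the p = 0 step, then the loop lemma from p = 1
    have hstep : cortaLoopA (w :: rest) coluna_l "" "" 0
        = cortaLoopA (w :: rest) coluna_l w "" 1 := by
      rw [cortaLoopA]
      simp
    have hjoin1 : PySem.Str.join " " ((w :: rest).take 1) = w := by
      simp [str_join_singleton]
    have hA := loopA_eq (w :: rest) coluna_l r hrle' hle hgt ((w :: rest).length - 1) 1 rfl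
      (le_refl _) (by simp)
    rw [hjoin1] at hA
    -- B side: the computed i equals max 1 r
    have hieq : (if r ≥ 1 then r else 1) = max 1 r := by
      by_cases h1 : r ≥ 1
      · rw [if_pos h1, Nat.max_eq_right h1]
      · rw [if_neg h1]; omega
    rw [hstep, hA, ← hieq]

-- ===== VERDICT (by name: the statement is the Claim_ definition above) =====
theorem corta_texto_spec : Claim_equal_corta_texto := by
  intro cad coluna_l _
  unfold Spec_corta_texto
  exact corta_texto_main cad coluna_l
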